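-- pv_equiv track=rewrite | github.com/HappyOnigiri/auto-review-fixer | src/result_report.py | format_phase_result_block
-- ===== SOURCE A (Python) =====
-- PHASE_TITLES = {
--     "ci-fix": "CI 修正",
--     "merge-conflict-resolution": "コンフリクト解消",
--     "review-fix": "レビュー修正",
-- }
--
-- def format_phase_result_block(
--     phase_label: str,
--     stdout_text: str,
--     timestamp: str,
--     comment_urls: list[str] | None = None,
-- ) -> str:
--     """1フェーズの実行結果ブロックを生成する。"""
--     phase_title = PHASE_TITLES.get(phase_label, phase_label)
--     stripped_stdout = stdout_text.strip()
--     fence = "```"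
--     while fence in stripped_stdout:
--         fence += "`"
--     lines = [
--         f"#### {phase_title}",
--         "",
--         f"**実行日時:** {timestamp}",
--     ]
--     if comment_urls:
--         url_links = ", ".join(
--             f"[link{i + 1}]({url})" for i, url in enumerate(comment_urls)
--         )
--         lines.append(f"**対象コメント:** {url_links}")
--     lines.extend(
--         [
--             "",
--             fence,
--             stripped_stdout,
--             fence,
--         ]
--     )
--     return "\n".join(lines)
-- ===== SOURCE B (Python) =====
-- PHASE_TITLES = {
--     "ci-fix": "CI 修正",
--     "merge-conflict-resolution": "コンフリクト解消",
--     "review-fix": "レビュー修正",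
-- }
--
-- def format_phase_result_block(
--     phase_label: str,
--     stdout_text: str,
--     timestamp: str,
--     comment_urls: list[str] | None = None,
-- ) -> str:
--     """1フェーズの実行結果ブロックを生成する。"""
--     phase_title = PHASE_TITLES.get(phase_label, phase_label)
--     stripped = stdout_text.strip()
--     # one pass: longest run of consecutive backticks, then the fence in closed form
--     best = cur = 0
--     for ch in stripped:
--         if ch == '`':
--             cur += 1
--             best = max(best, cur)
--         else:
--             cur = 0
--     fence = '`' * max(3, best + 1)
--     body = f"#### {phase_title}\n\n**実行日時:** {timestamp}"
--     if comment_urls: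
--         links = ", ".join(
--             f"[link{i}]({url})" for i, url in enumerate(comment_urls, 1)
--         )
--         body += f"\n**対象コメント:** {links}"
--     return body + f"\n\n{fence}\n{stripped}\n{fence}"
-- ===== Notes on version B (the rewrite author's own statement) =====
-- stated objective: simpler
-- what changed: The fence is computed in closed form from a single pass that finds the longest run of consecutive backticks ('`'*max(3,run+1)) instead of growing a candidate fence with repeated substring searches, and the block is assembled by direct string concatenation instead of building a list of lines and joining it.
import Mathlib
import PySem

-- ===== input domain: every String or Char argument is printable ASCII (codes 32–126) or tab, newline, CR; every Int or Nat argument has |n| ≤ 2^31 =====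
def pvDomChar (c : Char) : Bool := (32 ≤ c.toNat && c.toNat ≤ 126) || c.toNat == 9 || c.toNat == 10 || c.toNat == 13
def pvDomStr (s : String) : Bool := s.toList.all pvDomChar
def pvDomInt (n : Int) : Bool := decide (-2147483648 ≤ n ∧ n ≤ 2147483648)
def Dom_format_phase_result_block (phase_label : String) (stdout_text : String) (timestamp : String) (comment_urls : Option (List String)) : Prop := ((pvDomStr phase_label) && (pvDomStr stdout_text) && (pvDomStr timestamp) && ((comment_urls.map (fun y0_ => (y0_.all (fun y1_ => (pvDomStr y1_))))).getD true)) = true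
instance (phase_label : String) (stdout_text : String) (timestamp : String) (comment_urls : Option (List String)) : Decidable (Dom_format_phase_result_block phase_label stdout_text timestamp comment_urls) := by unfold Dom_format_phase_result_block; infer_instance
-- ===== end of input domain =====

-- B computes the fence in closed form from one pass over the text (longest backtick run)
-- and assembles the block by direct concatenation instead of a list of lines joined at the end.

-- ===== PORT A =====

-- shared module constant PHASE_TITLES (used verbatim by both Pythons)
def PHASE_TITLES : PySem.Dict String String :=
  PySem.Dict.ofList
    [("ci-fix", "CI 修正"),
     ("merge-conflict-resolution", "コンフリクト解消"),
     ("review-fix", "レビュー修正")]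

-- A's `while fence in stripped_stdout: fence += "`"`
def fenceLoopA (stripped : List Char) (fence : List Char) : List Char :=
  if h : PySem.Chars.isIn fence stripped then fenceLoopA stripped (fence ++ ['`']) else fence
termination_by stripped.length + 1 - fence.length
decreasing_by
  have hinf : fence <:+: stripped := (PySem.Chars.isIn_iff_infix fence stripped).mp h
  have := hinf.length_le
  simp only [List.length_append, List.length_cons, List.length_nil]
  omega

def format_phase_result_block (phase_label : String) (stdout_text : String) (timestamp : String) (comment_urls : Option (List String)) : String :=
  let phase_title := PHASE_TITLES.getD phase_label phase_label
  let stripped := PySem.Chars.strip stdout_text.toList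
  let fence := fenceLoopA stripped ['`', '`', '`']
  let lines : List (List Char) :=
    ["#### ".toList ++ phase_title.toList,
     [],
     "**実行日時:** ".toList ++ timestamp.toList]
  let lines := lines ++
    (match comment_urls with
     | some urls =>
       if urls.isEmpty then []
       else
         ["**対象コメント:** ".toList ++
           PySem.Chars.join ", ".toList
             ((PySem.List.enumerate urls 0).map (fun p =>
               "[link".toList ++ (PySem.Int.toStr (p.1 + 1)).toList ++ "](".toList ++ p.2.toList ++ [')'])) ]
     | none => [])
  let lines := lines ++ [[], fence, stripped, fence]
  String.mk (PySem.Chars.join "\n".toList lines)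

-- ===== PORT B =====

-- B's one-pass scan: cur = current backtick run, best = longest run so far
def maxRunScan : List Char → Nat → Nat → Nat
  | [], _, best => best
  | c :: cs, cur, best =>
    if c = '`' then maxRunScan cs (cur + 1) (max best (cur + 1)) else maxRunScan cs 0 best

def format_phase_result_block_alt (phase_label : String) (stdout_text : String) (timestamp : String) (comment_urls : Option (List String)) : String :=
  let phase_title := PHASE_TITLES.getD phase_label phase_label
  let stripped := PySem.Chars.strip stdout_text.toList
  let fence := List.replicate (max 3 (maxRunScan stripped 0 0 + 1)) '`'
  let body := "#### ".toList ++ phase_title.toList ++ "\n\n**実行日時:** ".toList ++ timestamp.toList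
  let body :=
    match comment_urls with
    | some urls =>
      if urls.isEmpty then body
      else
        body ++ "\n**対象コメント:** ".toList ++
          PySem.Chars.join ", ".toList
            ((PySem.List.enumerate urls 1).map (fun p =>
              "[link".toList ++ (PySem.Int.toStr p.1).toList ++ "](".toList ++ p.2.toList ++ [')']))
    | none => body
  String.mk (body ++ "\n\n".toList ++ fence ++ ['\n'] ++ stripped ++ ['\n'] ++ fence)

-- ===== PRECONDITION & SPEC =====
def Spec_format_phase_result_block (phase_label : String) (stdout_text : String) (timestamp : String) (comment_urls : Option (List String)) (out : String) : Prop := out = format_phase_result_block_alt phase_label stdout_text timestamp comment_urls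
instance (phase_label : String) (stdout_text : String) (timestamp : String) (comment_urls : Option (List String)) (out : String) : Decidable (Spec_format_phase_result_block phase_label stdout_text timestamp comment_urls out) := by unfold Spec_format_phase_result_block; infer_instance

-- ===== CLAIM (what is proved, stated in full; the proofs are below) =====
def Claim_equal_format_phase_result_block : Prop := ∀ (phase_label : String) (stdout_text : String) (timestamp : String) (comment_urls : Option (List String)), Dom_format_phase_result_block phase_label stdout_text timestamp comment_urls → Spec_format_phase_result_block phase_label stdout_text timestamp comment_urls (format_phase_result_block phase_label stdout_text timestamp comment_urls)

-- ===== LEMMAS AND PROOFS =====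

-- best only grows
lemma le_maxRunScan (s : List Char) (cur best : Nat) : best ≤ maxRunScan s cur best := by
  induction s generalizing cur best with
  | nil => simp [maxRunScan]
  | cons c cs ih =>
    simp only [maxRunScan]
    split
    · exact le_trans (le_max_left _ _) (ih _ _)
    · exact ih _ _

-- a backtick-run prefix pushes the scan past cur + k
lemma maxRunScan_prefix (k : Nat) : ∀ (s : List Char) (cur best : Nat), cur ≤ best →
    List.replicate k '`' <+: s → cur + k ≤ maxRunScan s cur best := by
  induction k with
  | zero =>
    intro s cur best hcb _
    simpa using le_trans hcb (le_maxRunScan s cur best)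
  | succ k ih =>
    intro s cur best hcb hpre
    match s, hpre with
    | _ :: s', h =>
      obtain ⟨t, ht⟩ := h
      rw [List.replicate_succ] at ht
      injection ht with hc ht'
      subst hc
      simp only [maxRunScan, if_pos rfl, reduceIte]
      have := ih s' (cur + 1) (max best (cur + 1)) (le_max_right _ _) ⟨t, ht'⟩
      omega

-- upper bound: any backtick run inside s is ≤ the scan result
lemma maxRunScan_infix (k : Nat) (s : List Char) : ∀ (cur best : Nat), cur ≤ best →
    List.replicate k '`' <:+: s → k ≤ maxRunScan s cur best := by
  induction s with
  | nil =>
    intro cur best _ h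
    have := h.length_le
    simp at this
    simp [maxRunScan, this]
  | cons c cs ih =>
    intro cur best hcb h
    rcases List.infix_cons_iff.mp h with hpre | hinf
    · have := maxRunScan_prefix k (c :: cs) cur best hcb hpre
      omega
    · simp only [maxRunScan]
      split
      · exact ih (cur + 1) (max best (cur + 1)) (le_max_right _ _) hinf
      · exact ih 0 best (Nat.zero_le _) hinf

-- realizability: the scan result (beyond best) is a run occurring in replicate cur '`' ++ s
lemma rep_succ_append (cur : Nat) (cs : List Char) :
    List.replicate (cur + 1) '`' ++ cs = List.replicate cur '`' ++ '`' :: cs := by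
  rw [List.replicate_succ']
  simp

-- realizability: the scan result (beyond best) is a run occurring in replicate cur '`' ++ s
lemma maxRunScan_realized (s : List Char) : ∀ (cur best : Nat),
    maxRunScan s cur best ≤ best ∨
      List.replicate (maxRunScan s cur best) '`' <:+: (List.replicate cur '`' ++ s) := by
  induction s with
  | nil => intro cur best; left; simp [maxRunScan]
  | cons c cs ih =>
    intro cur best
    by_cases hc : c = '`'
    · subst hc
      simp only [maxRunScan, if_pos rfl, reduceIte]
      rcases ih (cur + 1) (max best (cur + 1)) with h | h
      · rcases le_max_iff.mp h with h1 | h1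
        · exact Or.inl h1
        · right
          have hpre : List.replicate (maxRunScan cs (cur + 1) (max best (cur + 1))) '`' <+:
              List.replicate (cur + 1) '`' :=
            ⟨List.replicate (cur + 1 - maxRunScan cs (cur + 1) (max best (cur + 1))) '`', by
              rw [← List.replicate_add]; congr 1; omega⟩
          have hpre2 : List.replicate (cur + 1) '`' <+:
              (List.replicate cur '`' ++ '`' :: cs) := by
            refine ⟨cs, ?_⟩
            rw [rep_succ_append]
          exact (hpre.trans hpre2).isInfix
      · right
        rw [rep_succ_append] at h
        exact h
    · simp only [maxRunScan, if_neg hc]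
      rcases ih 0 best with h | h
      · exact Or.inl h
      · right
        simp only [List.replicate_zero, List.nil_append] at h
        have hsf : cs <:+ (List.replicate cur '`' ++ c :: cs) :=
          (List.suffix_cons c cs).trans (List.suffix_append _ _)
        exact h.trans hsf.isInfix

-- isIn of a backtick run ↔ the run length is at most the scan result
lemma isIn_replicate_iff (s : List Char) (k : Nat) :
    PySem.Chars.isIn (List.replicate k '`') s = true ↔ k ≤ maxRunScan s 0 0 := by
  rw [PySem.Chars.isIn_iff_infix]
  constructor
  · exact fun h => maxRunScan_infix k s 0 0 le_rfl h
  · intro hk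
    rcases Nat.eq_zero_or_pos k with hk0 | hkpos
    · subst hk0; simp
    · rcases maxRunScan_realized s 0 0 with h | h
      · omega
      · simp only [List.replicate_zero, List.nil_append] at h
        have hpre : List.replicate k '`' <+: List.replicate (maxRunScan s 0 0) '`' :=
          ⟨List.replicate (maxRunScan s 0 0 - k) '`', by
            rw [← List.replicate_add]; congr 1; omega⟩
        exact hpre.isInfix.trans h

-- A's fence loop in closed form
lemma fenceLoopA_eq (s : List Char) (d : Nat) : ∀ (j : Nat), maxRunScan s 0 0 + 1 ≤ j + d →
    fenceLoopA s (List.replicate j '`') = List.replicate (max j (maxRunScan s 0 0 + 1)) '`' := by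
  induction d with
  | zero =>
    intro j hj
    rw [fenceLoopA]
    have hnot : ¬ PySem.Chars.isIn (List.replicate j '`') s = true := by
      rw [isIn_replicate_iff]; omega
    rw [dif_neg hnot]
    congr 1
    exact (Nat.max_eq_left (by omega)).symm
  | succ d ih =>
    intro j hj
    by_cases h : PySem.Chars.isIn (List.replicate j '`') s = true
    · have hjM : j ≤ maxRunScan s 0 0 := (isIn_replicate_iff s j).mp h
      rw [fenceLoopA]
      rw [dif_pos h]
      have : List.replicate j '`' ++ ['`'] = List.replicate (j + 1) '`' := by
        rw [← List.replicate_succ']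
      rw [this, ih (j + 1) (by omega)]
      congr 1
      rw [Nat.max_eq_right (by omega : j + 1 ≤ maxRunScan s 0 0 + 1),
        Nat.max_eq_right (by omega : j ≤ maxRunScan s 0 0 + 1)]
    · rw [fenceLoopA, dif_neg h]
      have hjM : ¬ j ≤ maxRunScan s 0 0 := by rw [← isIn_replicate_iff s j]; exact h
      congr 1
      exact (Nat.max_eq_left (by omega)).symm

lemma fenceA_eq_fenceB (s : List Char) :
    fenceLoopA s ['`', '`', '`'] = List.replicate (max 3 (maxRunScan s 0 0 + 1)) '`' := by
  have : (['`', '`', '`'] : List Char) = List.replicate 3 '`' := rfl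
  rw [this, fenceLoopA_eq s (maxRunScan s 0 0 + 1) 3 (by omega)]

-- enumerate with start 1 vs start 0 with a shifted index
lemma enumerate_shift {α : Type} (xs : List α) : ∀ (n : Int),
    PySem.List.enumerate xs (n + 1) =
      (PySem.List.enumerate xs n).map (fun p => (p.1 + 1, p.2)) := by
  induction xs with
  | nil => intro n; simp [PySem.List.enumerate_nil]
  | cons x xs ih =>
    intro n
    rw [PySem.List.enumerate_cons, PySem.List.enumerate_cons, List.map_cons, ih (n + 1)]

lemma enumerate_one {α : Type} (xs : List α) :
    PySem.List.enumerate xs 1 = (PySem.List.enumerate xs 0).map (fun p => (p.1 + 1, p.2)) := by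
  simpa using enumerate_shift xs 0

-- literal chunk splits used to align B's concatenation with A's join
lemma tl1 : "\n\n**実行日時:** ".toList = "\n".toList ++ "\n".toList ++ "**実行日時:** ".toList := by decide
lemma tl2 : "\n\n".toList = "\n".toList ++ "\n".toList := by decide
lemma tl3 : "\n**対象コメント:** ".toList = "\n".toList ++ "**対象コメント:** ".toList := by decide

-- ===== VERDICT (by name: the statement is the Claim_ definition above) =====
theorem format_phase_result_block_spec : Claim_equal_format_phase_result_block := by
  intro phase_label stdout_text timestamp comment_urls _
  unfold Spec_format_phase_result_block
  unfold format_phase_result_block format_phase_result_block_alt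
  simp only [fenceA_eq_fenceB]
  cases comment_urls with
  | none =>
    simp [PySem.Chars.join_cons_cons, PySem.Chars.join_singleton, tl1, tl2]
  | some urls =>
    by_cases hu : urls.isEmpty
    · simp [hu, PySem.Chars.join_cons_cons, PySem.Chars.join_singleton, tl1, tl2]
    · simp [hu, PySem.Chars.join_cons_cons, PySem.Chars.join_singleton, tl1, tl2, tl3,
        enumerate_one, List.map_map, Function.comp_def]
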